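-- pv_equiv track=rewrite | github.com/mchaisso/phasedsv | quiver_bin/lib/python2.7/site-packages/GenomicConsensus/consensus.py | areContiguous
-- ===== SOURCE A (Python) =====
-- def areContiguous(refWindows):
--     """
--     Predicate that determines whether the reference/scaffold windows
--     are contiguous.
--     """
--     lastEnd = None
--     lastId  = None
--     for refWin in refWindows:
--         id, start, end = refWin
--         if ((lastId is not None and id != lastId) or
--             (lastEnd is not None and start != lastEnd)):
--             return False
--         lastEnd = end
--         lastId  = id
--     return True
-- ===== SOURCE B (Python) =====
-- def areContiguous(refWindows):
--     """
--     Predicate that determines whether the reference/scaffold windows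
--     are contiguous.
--     """
--     if not refWindows:
--         return True
--     ids, starts, ends = zip(*refWindows)
--     return len(set(ids)) == 1 and list(ends[:-1]) == list(starts[1:])
-- ===== Notes on version B (the rewrite author's own statement) =====
-- stated objective: alternative
-- what changed: replaces A's single stateful scan with a columnar decomposition: transpose the windows into id/start/end columns, then check len(set(ids))==1 and that the ends column shifted by one equals the starts column (slice equality)
import Mathlib
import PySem

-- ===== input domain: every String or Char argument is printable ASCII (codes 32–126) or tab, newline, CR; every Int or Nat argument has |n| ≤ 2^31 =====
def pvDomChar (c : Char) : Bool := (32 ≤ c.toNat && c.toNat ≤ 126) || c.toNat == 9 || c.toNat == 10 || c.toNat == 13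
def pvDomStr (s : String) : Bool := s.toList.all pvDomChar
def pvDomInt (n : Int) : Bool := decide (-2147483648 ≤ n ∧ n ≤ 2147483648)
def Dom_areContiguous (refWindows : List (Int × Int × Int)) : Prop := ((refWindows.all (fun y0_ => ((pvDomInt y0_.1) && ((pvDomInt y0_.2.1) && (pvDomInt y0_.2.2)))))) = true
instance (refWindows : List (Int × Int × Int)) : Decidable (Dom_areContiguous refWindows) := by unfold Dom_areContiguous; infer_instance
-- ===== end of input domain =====

-- B replaces A's stateful scan by a columnar check: all ids form a one-element set,
-- and the ends column without its last entry equals the starts column without its first.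

-- ===== PORT A =====
-- A's loop threading lastEnd/lastId (None → Option.none); `return False` returns from the recursion.
def areContiguousGo (lastEnd lastId : Option Int) : List (Int × Int × Int) → Bool
  | [] => true
  | (id, start, «end») :: rest =>
    if (lastId.any (fun li => id != li)) || (lastEnd.any (fun le => start != le)) then
      false
    else
      areContiguousGo (some «end») (some id) rest

def areContiguous (refWindows : List (Int × Int × Int)) : Bool :=
  areContiguousGo none none refWindows

-- ===== PORT B =====
-- `if not refWindows: return True`; `zip(*refWindows)` transposes into the three columns;
-- `len(set(ids)) == 1`; `ends[:-1] == starts[1:]` via PySem slices.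
def areContiguous_alt (refWindows : List (Int × Int × Int)) : Bool :=
  if refWindows.isEmpty then true
  else
    let ids := refWindows.map (·.1)
    let starts := refWindows.map (·.2.1)
    let ends := refWindows.map (·.2.2)
    (PySem.Set.ofList ids).length == 1 &&
      PySem.List.slice ends none (some (-1)) == PySem.List.slice starts (some 1) none

-- ===== PRECONDITION & SPEC =====
def Spec_areContiguous (refWindows : List (Int × Int × Int)) (out : Bool) : Prop := out = areContiguous_alt refWindows
instance (refWindows : List (Int × Int × Int)) (out : Bool) : Decidable (Spec_areContiguous refWindows out) := by unfold Spec_areContiguous; infer_instance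

-- ===== CLAIM =====
def Claim_equal_areContiguous : Prop := ∀ (refWindows : List (Int × Int × Int)), Dom_areContiguous refWindows → Spec_areContiguous refWindows (areContiguous refWindows)

-- ===== LEMMAS AND PROOFS =====

-- A's loop after the first window equals: every later id equals w's id, and the
-- shifted end/start columns of w :: rest agree.
theorem areContiguousGo_characterize (rest : List (Int × Int × Int)) :
    ∀ w : Int × Int × Int,
      areContiguousGo (some w.2.2) (some w.1) rest =
        ((rest.map (·.1)).all (fun i => i == w.1) &&
          (((w :: rest).map (·.2.2)).dropLast == ((w :: rest).map (·.2.1)).tail)) := by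
  induction rest with
  | nil => intro w; rfl
  | cons x rs ih =>
    intro w
    obtain ⟨i1, s1, e1⟩ := w
    obtain ⟨i2, s2, e2⟩ := x
    simp only [areContiguousGo, Option.any_some, List.map_cons, List.all_cons,
      List.tail_cons]
    by_cases h1 : i2 = i1 <;> by_cases h2 : s2 = e1
    · subst h1; subst h2
      rw [ih ⟨i2, s2, e2⟩]
      simp [List.dropLast_cons_of_ne_nil]
    · subst h1
      simp [h2, Ne.symm h2, List.dropLast_cons_of_ne_nil]
    · simp [h1]
    · simp [h1]

-- ends[:-1] is dropLast
theorem slice_neg_one (xs : List Int) :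
    PySem.List.slice xs none (some (-1)) = xs.dropLast := by
  simp only [PySem.List.slice, PySem.List.clampIdx]
  cases xs with
  | nil => rfl
  | cons x t =>
    have hlen : ((x :: t).length : Int) + (-1) = t.length := by simp
    simp only [hlen]
    norm_num
    rw [List.dropLast_eq_take]
    have h0 : ¬ ((t.length : Int) < 0) := by omega
    simp [h0]

-- starts[1:] is tail
theorem slice_one (xs : List Int) :
    PySem.List.slice xs (some 1) none = xs.tail := by
  rw [PySem.List.slice_from xs (by norm_num)]
  simp [List.drop_one]

-- len(set(i :: l)) == 1  iff every element of l equals i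
theorem setLen_one (i : Int) (l : List Int) :
    ((PySem.Set.ofList (i :: l)).length == 1) = l.all (fun j => j == i) := by
  rw [PySem.Set.ofList_cons]
  have key : (PySem.Set.discard (PySem.Set.ofList l) i = []) ↔ (∀ j ∈ l, j = i) := by
    rw [List.eq_nil_iff_forall_not_mem]
    constructor
    · intro h j hj
      by_contra hne
      exact h j ((PySem.Set.mem_discard _ _ _).mpr ⟨(PySem.Set.mem_ofList _ _).mpr hj, hne⟩)
    · intro h y hy
      obtain ⟨hy1, hy2⟩ := (PySem.Set.mem_discard _ _ _).mp hy
      exact hy2 (h y ((PySem.Set.mem_ofList _ _).mp hy1))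
  by_cases hall : ∀ j ∈ l, j = i
  · have hd := key.mpr hall
    simp only [hd, List.length_cons, List.length_nil]
    simp [List.all_eq_true]
    exact hall
  · have hd : PySem.Set.discard (PySem.Set.ofList l) i ≠ [] := fun h => hall (key.mp h)
    have hlen : (PySem.Set.discard (PySem.Set.ofList l) i).length ≠ 0 := by
      simpa [List.length_eq_zero_iff] using hd
    have hr : l.all (fun j => j == i) = false := by
      simpa [List.all_eq_true] using hall
    simp [hr, hlen]

-- ===== VERDICT =====
theorem areContiguous_spec : Claim_equal_areContiguous := by
  intro ws _
  unfold Spec_areContiguous areContiguous areContiguous_alt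
  cases ws with
  | nil => rfl
  | cons w rest =>
    simp only [List.isEmpty_cons, Bool.false_eq_true, if_false, slice_neg_one, slice_one,
      List.map_cons, List.tail_cons, setLen_one]
    have := areContiguousGo_characterize rest w
    simpa [areContiguousGo] using this
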